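-- pv_equiv track=rewrite | github.com/seojihwan/algorithm | Python/programmers/2020 winter/2.py | solution
-- ===== SOURCE A (Python) =====
-- def solution(encrypted_text, key, rotation):
--     answer = ''
--     temp = ''
--     for idx, e in enumerate(encrypted_text):
--         i = (idx + rotation) % len(encrypted_text)
--         temp += encrypted_text[i]
--     for i in range(len(key)):
--         cnt = (ord(temp[i]) - (ord(key[i]) - 96) + 26)
--         if cnt >= 123:
--             cnt -= 26
--         answer += chr(cnt)
--     return answer
-- ===== SOURCE B (Python) =====
-- def solution(encrypted_text, key, rotation):
--     if encrypted_text: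
--         r = rotation % len(encrypted_text)
--         temp = encrypted_text[r:] + encrypted_text[:r]
--     else:
--         temp = ''
--     out = []
--     for t, k in zip(temp, key):
--         cnt = ord(t) - ord(k) + 122
--         out.append(chr(cnt if cnt < 123 else cnt - 26))
--     return ''.join(out)
-- ===== Notes on version B (the rewrite author's own statement) =====
-- stated objective: idiomatic
-- what changed: Replaces the character-by-character index-remapping rotation loop with a closed-form slice rotation (text[r:] + text[:r] with r = rotation % n), and drives the decryption by zipping the rotated text with the key instead of indexing both by a range loop.
import Mathlib
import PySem

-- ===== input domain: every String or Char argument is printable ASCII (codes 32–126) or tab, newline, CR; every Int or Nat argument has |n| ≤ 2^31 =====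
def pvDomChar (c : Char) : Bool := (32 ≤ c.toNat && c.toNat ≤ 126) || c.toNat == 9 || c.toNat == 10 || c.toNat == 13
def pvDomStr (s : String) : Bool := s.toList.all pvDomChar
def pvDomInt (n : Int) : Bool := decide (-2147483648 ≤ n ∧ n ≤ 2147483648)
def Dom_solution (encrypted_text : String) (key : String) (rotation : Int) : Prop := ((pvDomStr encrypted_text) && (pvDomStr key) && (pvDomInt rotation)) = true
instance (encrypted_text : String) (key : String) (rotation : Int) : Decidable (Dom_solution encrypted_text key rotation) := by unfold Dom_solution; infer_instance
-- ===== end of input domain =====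

-- B replaces A's per-character index-remapping rotation loop by a closed-form slice
-- rotation and zips the rotated text with the key (idiomatic; not claimed faster).

-- ===== PORT A =====
def solution (encrypted_text : String) (key : String) (rotation : Int) : String :=
  let es := encrypted_text.toList
  -- for idx, e in enumerate(encrypted_text): temp += encrypted_text[(idx+rotation) % len(...)]
  -- pyGet? here is always 'some' (the modulus puts the index in range); 'none' appends nothing
  let temp : List Char := (PySem.List.enumerate es).foldl
    (fun acc p =>
      acc ++ (PySem.List.pyGet? es (PySem.Int.mod (p.1 + rotation) (es.length : Int))).toList) []
  let ks := key.toList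
  -- for i in range(len(key)): …  temp[i] raises IndexError when len(key) > len(text):
  -- there pyGet? is none and nothing is appended — those inputs are excluded by Pre_;
  -- key[i] is always in range, ported with pyGetD
  let answer : List Char := (PySem.List.pyRange 0 (ks.length : Int) 1).foldl
    (fun acc i =>
      acc ++ (PySem.List.pyGet? temp i).toList.map (fun t =>
        let cnt : Int := (t.toNat : Int) - (((PySem.List.pyGetD ks i ' ').toNat : Int) - 96) + 26
        Char.ofNat (if cnt ≥ 123 then cnt - 26 else cnt).toNat)) []
  String.ofList answer

-- ===== PORT B =====
def solution_alt (encrypted_text : String) (key : String) (rotation : Int) : String :=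
  let es := encrypted_text.toList
  let temp : List Char :=
    if es.isEmpty then []
    else
      let r : Int := PySem.Int.mod rotation (es.length : Int)
      PySem.List.slice es (some r) none ++ PySem.List.slice es none (some r)
  String.ofList ((temp.zip key.toList).map (fun p =>
    let cnt : Int := (p.1.toNat : Int) - (p.2.toNat : Int) + 122
    Char.ofNat (if cnt < 123 then cnt else cnt - 26).toNat))

-- ===== PRECONDITION & SPEC =====
-- Pre_ excludes exactly the inputs where A raises IndexError: key longer than the text.
def Pre_solution (encrypted_text : String) (key : String) (rotation : Int) : Prop :=
  key.toList.length ≤ encrypted_text.toList.length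
instance (encrypted_text : String) (key : String) (rotation : Int) : Decidable (Pre_solution encrypted_text key rotation) := by unfold Pre_solution; infer_instance
def pvWitness_solution : String × String × Int := ("abc", "yz", 4)

def Spec_solution (encrypted_text : String) (key : String) (rotation : Int) (out : String) : Prop := out = solution_alt encrypted_text key rotation
instance (encrypted_text : String) (key : String) (rotation : Int) (out : String) : Decidable (Spec_solution encrypted_text key rotation out) := by unfold Spec_solution; infer_instance

-- ===== CLAIM (what is proved, stated in full; the proofs are below) =====
def Claim_equal_solution : Prop := ∀ (encrypted_text : String) (key : String) (rotation : Int), Dom_solution encrypted_text key rotation → Pre_solution encrypted_text key rotation → Spec_solution encrypted_text key rotation (solution encrypted_text key rotation)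

-- ===== LEMMAS AND PROOFS =====

-- index arithmetic: Python's (i + rot) % n equals the Nat-level (i + rot % n) % n
lemma mod_shift_eq (i : Nat) (rot : Int) (n : Nat) (hn : 0 < n) :
    (PySem.Int.mod ((i : Int) + rot) (n : Int)).toNat
      = (i + (PySem.Int.mod rot (n : Int)).toNat) % n := by
  have hn' : (0 : Int) < (n : Int) := by exact_mod_cast hn
  rw [PySem.Int.mod_eq_emod_of_pos hn', PySem.Int.mod_eq_emod_of_pos hn']
  have h1 : ((i : Int) + rot) % (n : Int) = ((i : Int) + rot % (n : Int)) % (n : Int) := by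
    conv_lhs => rw [← Int.ediv_add_emod rot (n : Int)]
    rw [show (i : Int) + ((n : Int) * (rot / (n : Int)) + rot % (n : Int))
          = (i : Int) + rot % (n : Int) + (n : Int) * (rot / (n : Int)) by ring,
        Int.add_mul_emod_self_left]
  rw [h1]
  have hm : 0 ≤ rot % (n : Int) := Int.emod_nonneg rot (by omega)
  have h2 : (i : Int) + rot % (n : Int) = ((i + (rot % (n : Int)).toNat : Nat) : Int) := by
    push_cast [Int.toNat_of_nonneg hm]; ring
  rw [h2, ← Int.natCast_emod, Int.toNat_natCast]

-- A's first loop builds the left-rotation of the text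
lemma tempA_eq (es : List Char) (rot : Int) (hne : es ≠ []) :
    (PySem.List.enumerate es).foldl
      (fun acc p =>
        acc ++ (PySem.List.pyGet? es (PySem.Int.mod (p.1 + rot) (es.length : Int))).toList) []
      = es.rotate (PySem.Int.mod rot (es.length : Int)).toNat := by
  have hn : 0 < es.length := List.length_pos_iff.mpr hne
  have hn' : (0 : Int) < (es.length : Int) := by exact_mod_cast hn
  have hstep : ∀ (acc : List Char) (p : Int × Char), p ∈ PySem.List.enumerate es →
      acc ++ (PySem.List.pyGet? es (PySem.Int.mod (p.1 + rot) (es.length : Int))).toList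
        = acc ++ [es.getD (PySem.Int.mod (p.1 + rot) (es.length : Int)).toNat ' '] := by
    intro acc p hp
    rcases (PySem.List.mem_enumerate_iff es 0 p).mp hp with ⟨k, hk, rfl⟩
    have h0 : 0 ≤ PySem.Int.mod (((0 : Int) + (k : Int)) + rot) (es.length : Int) :=
      PySem.Int.mod_nonneg _ hn'
    have hlt : PySem.Int.mod (((0 : Int) + (k : Int)) + rot) (es.length : Int) < (es.length : Int) :=
      PySem.Int.mod_lt _ hn'
    have hlt' : (PySem.Int.mod (((0 : Int) + (k : Int)) + rot) (es.length : Int)).toNat < es.length := by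
      omega
    rw [PySem.List.pyGet?_of_nonneg es h0, List.getElem?_eq_getElem hlt',
        List.getD_eq_getElem es ' ' hlt']
    rfl
  rw [PySem.List.foldl_congr_mem _ _ _ _ hstep, PySem.List.foldl_append_singleton_eq_map, List.nil_append]
  apply List.ext_getElem
  · simp [PySem.List.length_enumerate]
  · intro j h1 h2
    rw [List.getElem_map, PySem.List.getElem_enumerate]
    have hj : j < es.length := by simpa [PySem.List.length_enumerate] using h1
    simp only [zero_add]
    rw [mod_shift_eq j rot es.length hn, List.getElem_rotate]
    have : (j + (PySem.Int.mod rot (es.length : Int)).toNat) % es.length < es.length :=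
      Nat.mod_lt _ hn
    rw [List.getD_eq_getElem es ' ' this]

-- B's slice pair is the same rotation
lemma tempB_eq (es : List Char) (rot : Int) (hne : es ≠ []) :
    PySem.List.slice es (some (PySem.Int.mod rot (es.length : Int))) none
      ++ PySem.List.slice es none (some (PySem.Int.mod rot (es.length : Int)))
      = es.rotate (PySem.Int.mod rot (es.length : Int)).toNat := by
  have hn : 0 < es.length := List.length_pos_iff.mpr hne
  have hn' : (0 : Int) < (es.length : Int) := by exact_mod_cast hn
  have h0 : 0 ≤ PySem.Int.mod rot (es.length : Int) := PySem.Int.mod_nonneg _ hn'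
  have hlt : PySem.Int.mod rot (es.length : Int) < (es.length : Int) := PySem.Int.mod_lt _ hn'
  obtain ⟨m, hm⟩ : ∃ m : Nat, PySem.Int.mod rot (es.length : Int) = (m : Int) :=
    ⟨_, (Int.toNat_of_nonneg h0).symm⟩
  rw [hm] at hlt
  have hm' : m ≤ es.length := by exact_mod_cast hlt.le
  rw [hm, PySem.List.slice_from_natCast, PySem.List.slice_to_natCast, Int.toNat_natCast,
      List.rotate_eq_drop_append_take hm']

-- the two decryption passes agree on any temp long enough for the key
lemma answer_eq (temp ks : List Char) (hk : ks.length ≤ temp.length) :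
    (PySem.List.pyRange 0 (ks.length : Int) 1).foldl
      (fun acc i =>
        acc ++ (PySem.List.pyGet? temp i).toList.map (fun t =>
          let cnt : Int := (t.toNat : Int) - (((PySem.List.pyGetD ks i ' ').toNat : Int) - 96) + 26
          Char.ofNat (if cnt ≥ 123 then cnt - 26 else cnt).toNat)) []
      = (temp.zip ks).map (fun p =>
          let cnt : Int := (p.1.toNat : Int) - (p.2.toNat : Int) + 122
          Char.ofNat (if cnt < 123 then cnt else cnt - 26).toNat) := by
  have hstep : ∀ (acc : List Char) (i : Int), i ∈ PySem.List.pyRange 0 (ks.length : Int) 1 →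
      (acc ++ (PySem.List.pyGet? temp i).toList.map (fun t =>
          let cnt : Int := (t.toNat : Int) - (((PySem.List.pyGetD ks i ' ').toNat : Int) - 96) + 26
          Char.ofNat (if cnt ≥ 123 then cnt - 26 else cnt).toNat))
        = acc ++ [(fun i : Int =>
            let t := temp.getD i.toNat ' '
            let cnt : Int := (t.toNat : Int) - (((ks.getD i.toNat ' ').toNat : Int) - 96) + 26
            Char.ofNat (if cnt ≥ 123 then cnt - 26 else cnt).toNat) i] := by
    intro acc i hi
    rcases PySem.List.mem_pyRange_one.mp hi with ⟨h0, h1⟩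
    have hik : i.toNat < ks.length := by omega
    have hit : i.toNat < temp.length := by omega
    rw [PySem.List.pyGet?_of_nonneg temp h0, List.getElem?_eq_getElem hit,
        PySem.List.pyGetD_eq_getElem ks ' ' h0 h1]
    simp only [Option.toList_some, List.map_cons, List.map_nil]
    rw [List.getD_eq_getElem temp ' ' hit, List.getD_eq_getElem ks ' ' hik]
  rw [PySem.List.foldl_congr_mem _ _ _ _ hstep, PySem.List.foldl_append_singleton_eq_map, List.nil_append]
  apply List.ext_getElem
  · simp [PySem.List.length_pyRange_one, List.length_zip]; omega
  · intro j h1 h2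
    have hj : j < ks.length := by
      simpa [PySem.List.length_pyRange_one] using h1
    rw [List.getElem_map, List.getElem_map, PySem.List.getElem_pyRange_one, List.getElem_zip]
    simp only [zero_add, Int.toNat_natCast]
    rw [List.getD_eq_getElem temp ' ' (by omega), List.getD_eq_getElem ks ' ' hj]
    have harith : ∀ a b : Int,
        (if a - (b - 96) + 26 ≥ 123 then a - (b - 96) + 26 - 26 else a - (b - 96) + 26)
          = (if a - b + 122 < 123 then a - b + 122 else a - b + 122 - 26) := by
      intro a b; split_ifs <;> omega
    simp only [harith]

-- ===== VERDICT (by name: the statement is the Claim_ definition above) =====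
theorem solution_spec : Claim_equal_solution := by
  intro e k rot _ hpre
  unfold Pre_solution at hpre
  unfold Spec_solution
  by_cases hes : e.toList = []
  · have hks : k.toList = [] := by
      rw [hes] at hpre; exact List.eq_nil_of_length_eq_zero (Nat.le_zero.mp hpre)
    simp [solution, solution_alt, hes, hks, PySem.List.pyRange_one_eq_nil]
  · have hne : ¬ e.toList.isEmpty := by simpa [List.isEmpty_iff] using hes
    simp only [solution, solution_alt, hne, Bool.false_eq_true, ↓reduceIte]
    rw [tempA_eq e.toList rot hes, tempB_eq e.toList rot hes,
        answer_eq _ _ (by rw [List.length_rotate]; exact hpre)]
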